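-- pv_equiv track=rewrite | github.com/mudit7011/smart-todo-manager | backend/tasks/ai_module.py | map_ai_category_to_id
-- ===== SOURCE A (Python) =====
-- MOCK_CATEGORIES = [
--     {"id": 3, "name": "Career"},
--     {"id": 4, "name": "Personal"},
--     {"id": 5, "name": "Health"},
--     {"id": 6, "name": "Urgent"},
-- ]
--
-- def map_ai_category_to_id(ai_suggested_category_name):
--     if not ai_suggested_category_name:
--         return None
--     lower_ai_name = ai_suggested_category_name.lower().strip()
--     for cat in MOCK_CATEGORIES:
--         if cat["name"].lower() == lower_ai_name:
--             return cat["id"]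
--     if "career" in lower_ai_name or "job" in lower_ai_name or "work" in lower_ai_name:
--         for cat in MOCK_CATEGORIES:
--             if cat["name"].lower() == "career": return cat["id"]
--     elif "personal" in lower_ai_name or "life" in lower_ai_name or "hobby" in lower_ai_name:
--         for cat in MOCK_CATEGORIES:
--             if cat["name"].lower() == "personal": return cat["id"]
--     elif "health" in lower_ai_name or "medical" in lower_ai_name or "fitness" in lower_ai_name:
--         for cat in MOCK_CATEGORIES:
--             if cat["name"].lower() == "health": return cat["id"]
--     elif "urgent" in lower_ai_name or "priority" in lower_ai_name or "immediate" in lower_ai_name: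
--         for cat in MOCK_CATEGORIES:
--             if cat["name"].lower() == "urgent": return cat["id"]
--     for cat in MOCK_CATEGORIES:
--         if cat["name"].lower() == "personal":
--             return cat["id"]
--     return None
-- ===== SOURCE B (Python) =====
-- # The exact-match pass of the original is redundant: each exact category name
-- # ("career", "personal", "health", "urgent") already contains its own keyword and no
-- # keyword of an earlier group, so a single flat first-match keyword scan suffices.
-- _KEYWORD_IDS = [
--     ("career", 3), ("job", 3), ("work", 3),
--     ("personal", 4), ("life", 4), ("hobby", 4),
--     ("health", 5), ("medical", 5), ("fitness", 5),
--     ("urgent", 6), ("priority", 6), ("immediate", 6),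
-- ]
--
-- def map_ai_category_to_id(ai_suggested_category_name):
--     if not ai_suggested_category_name:
--         return None
--     name = ai_suggested_category_name.lower().strip()
--     return next((cid for kw, cid in _KEYWORD_IDS if kw in name), 4)
-- ===== Notes on version B (the rewrite author's own statement) =====
-- stated objective: simpler
-- what changed: Removed A's exact-match scan over MOCK_CATEGORIES entirely (each exact category name is subsumed by its own keyword rule) and collapsed the four if/elif branches with their inner category scans into one first-match scan over a flat (keyword, id) list with default 4.
import Mathlib
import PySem

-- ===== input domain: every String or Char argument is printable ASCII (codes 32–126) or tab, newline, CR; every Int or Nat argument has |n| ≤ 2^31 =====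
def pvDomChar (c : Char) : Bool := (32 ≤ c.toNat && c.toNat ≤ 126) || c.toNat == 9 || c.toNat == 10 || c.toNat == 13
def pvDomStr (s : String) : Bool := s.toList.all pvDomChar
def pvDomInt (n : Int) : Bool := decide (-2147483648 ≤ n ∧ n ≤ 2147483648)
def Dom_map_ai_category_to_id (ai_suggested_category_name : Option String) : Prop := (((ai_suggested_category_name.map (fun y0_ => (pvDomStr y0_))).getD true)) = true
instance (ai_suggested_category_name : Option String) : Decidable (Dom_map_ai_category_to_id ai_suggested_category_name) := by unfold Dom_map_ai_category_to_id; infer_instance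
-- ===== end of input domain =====

-- B drops A's exact-match pass (each exact category name is subsumed by its own keyword rule)
-- and replaces the two-stage branch logic by one first-match scan over a flat (keyword, id) list (objective: simpler).

-- ===== PORT A =====
-- MOCK_CATEGORIES: each dict {"id": i, "name": n} is the pair (i, n)
def MOCK_CATEGORIES : List (Int × String) :=
  [(3, "Career"), (4, "Personal"), (5, "Health"), (6, "Urgent")]

-- the 'for cat in MOCK_CATEGORIES: if cat["name"].lower() == target: return cat["id"]' loop of A
def pvFindCat (target : String) : List (Int × String) → Option Int
  | [] => none
  | (i, n) :: rest => if PySem.Str.lower n == target then some i else pvFindCat target rest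

-- body of A after the falsy guard and normalisation (argument = lower_ai_name)
def pvABody (lower_ai_name : String) : Option Int :=
  match pvFindCat lower_ai_name MOCK_CATEGORIES with
  | some i => some i
  | none =>
    let branch :=
      if PySem.Str.isIn "career" lower_ai_name || PySem.Str.isIn "job" lower_ai_name || PySem.Str.isIn "work" lower_ai_name then
        pvFindCat "career" MOCK_CATEGORIES
      else if PySem.Str.isIn "personal" lower_ai_name || PySem.Str.isIn "life" lower_ai_name || PySem.Str.isIn "hobby" lower_ai_name then
        pvFindCat "personal" MOCK_CATEGORIES
      else if PySem.Str.isIn "health" lower_ai_name || PySem.Str.isIn "medical" lower_ai_name || PySem.Str.isIn "fitness" lower_ai_name then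
        pvFindCat "health" MOCK_CATEGORIES
      else if PySem.Str.isIn "urgent" lower_ai_name || PySem.Str.isIn "priority" lower_ai_name || PySem.Str.isIn "immediate" lower_ai_name then
        pvFindCat "urgent" MOCK_CATEGORIES
      else none
    match branch with
    | some i => some i
    | none =>
      match pvFindCat "personal" MOCK_CATEGORIES with
      | some i => some i
      | none => none

def map_ai_category_to_id (ai_suggested_category_name : Option String) : Option Int :=
  match ai_suggested_category_name with
  | none => none
  | some s =>
    if s == "" then none
    else pvABody (PySem.Str.strip (PySem.Str.lower s))

-- ===== PORT B =====
def pvKeywordIds : List (String × Int) :=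
  [("career", 3), ("job", 3), ("work", 3),
   ("personal", 4), ("life", 4), ("hobby", 4),
   ("health", 5), ("medical", 5), ("fitness", 5),
   ("urgent", 6), ("priority", 6), ("immediate", 6)]

-- next((cid for kw, cid in _KEYWORD_IDS if kw in name), 4)
def pvFirstKw (name : String) : List (String × Int) → Int
  | [] => 4
  | (kw, cid) :: rest => if PySem.Str.isIn kw name then cid else pvFirstKw name rest

def map_ai_category_to_id_alt (ai_suggested_category_name : Option String) : Option Int :=
  match ai_suggested_category_name with
  | none => none
  | some s =>
    if s == "" then none
    else some (pvFirstKw (PySem.Str.strip (PySem.Str.lower s)) pvKeywordIds)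

-- ===== PRECONDITION & SPEC =====
def Spec_map_ai_category_to_id (ai_suggested_category_name : Option String) (out : Option Int) : Prop := out = map_ai_category_to_id_alt ai_suggested_category_name
instance (ai_suggested_category_name : Option String) (out : Option Int) : Decidable (Spec_map_ai_category_to_id ai_suggested_category_name out) := by unfold Spec_map_ai_category_to_id; infer_instance

-- ===== CLAIM (what is proved, stated in full; the proofs are below) =====
def Claim_equal_map_ai_category_to_id : Prop := ∀ (ai_suggested_category_name : Option String), Dom_map_ai_category_to_id ai_suggested_category_name → Spec_map_ai_category_to_id ai_suggested_category_name (map_ai_category_to_id ai_suggested_category_name)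

-- ===== LEMMAS AND PROOFS =====

theorem pvBody_eq (t : String) : pvABody t = some (pvFirstKw t pvKeywordIds) := by
  by_cases h1 : t = "career"; · subst h1; decide
  by_cases h2 : t = "personal"; · subst h2; decide
  by_cases h3 : t = "health"; · subst h3; decide
  by_cases h4 : t = "urgent"; · subst h4; decide
  have hf : pvFindCat t MOCK_CATEGORIES = none := by
    simp only [pvFindCat, MOCK_CATEGORIES,
      show PySem.Str.lower "Career" = "career" from by decide,
      show PySem.Str.lower "Personal" = "personal" from by decide,
      show PySem.Str.lower "Health" = "health" from by decide,
      show PySem.Str.lower "Urgent" = "urgent" from by decide]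
    have c1 : ("career" == t) = false := by rw [beq_eq_false_iff_ne]; exact fun he => h1 he.symm
    have c2 : ("personal" == t) = false := by rw [beq_eq_false_iff_ne]; exact fun he => h2 he.symm
    have c3 : ("health" == t) = false := by rw [beq_eq_false_iff_ne]; exact fun he => h3 he.symm
    have c4 : ("urgent" == t) = false := by rw [beq_eq_false_iff_ne]; exact fun he => h4 he.symm
    simp [c1, c2, c3, c4]
  unfold pvABody
  rw [hf]
  simp only [pvFirstKw, pvKeywordIds,
    show pvFindCat "career" MOCK_CATEGORIES = some 3 from by decide,
    show pvFindCat "personal" MOCK_CATEGORIES = some 4 from by decide,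
    show pvFindCat "health" MOCK_CATEGORIES = some 5 from by decide,
    show pvFindCat "urgent" MOCK_CATEGORIES = some 6 from by decide]
  generalize PySem.Str.isIn "career" t = a
  generalize PySem.Str.isIn "job" t = b
  generalize PySem.Str.isIn "work" t = c
  generalize PySem.Str.isIn "personal" t = d
  generalize PySem.Str.isIn "life" t = e
  generalize PySem.Str.isIn "hobby" t = f
  generalize PySem.Str.isIn "health" t = g
  generalize PySem.Str.isIn "medical" t = h
  generalize PySem.Str.isIn "fitness" t = i
  generalize PySem.Str.isIn "urgent" t = j
  generalize PySem.Str.isIn "priority" t = k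
  generalize PySem.Str.isIn "immediate" t = l
  revert a b c d e f g h i j k l
  decide

-- ===== VERDICT (by name: the statement is the Claim_ definition above) =====
theorem map_ai_category_to_id_spec : Claim_equal_map_ai_category_to_id := by
  intro o _
  unfold Spec_map_ai_category_to_id
  cases o with
  | none => rfl
  | some s =>
    show (if s == "" then none else pvABody (PySem.Str.strip (PySem.Str.lower s)))
        = (if s == "" then none else some (pvFirstKw (PySem.Str.strip (PySem.Str.lower s)) pvKeywordIds))
    rw [pvBody_eq]
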